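-- pv_equiv track=rewrite | github.com/aja114/aoc | 2023/day12.py | calc_condition
-- ===== SOURCE A (Python) =====
-- def calc_condition(springs: list[str]):
--     condition = []
--     func = False
--     curr_count = 0
--     for s in springs:
--         if s == "?":
--             break
--         if s == "." and func is True:
--             condition.append(curr_count)
--             curr_count = 0
--             func = False
--         if s == "#":
--             func = True
--             curr_count += 1
--     if func is True:
--         condition.append(curr_count)
--     return tuple(condition)
-- ===== SOURCE B (Python) =====
-- def _runs(ts):
--     # dot-delimited recursion: count '#' in the segment before the first '.',
--     # keep the count only if non-zero, recurse on the remainder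
--     if "." not in ts:
--         c = ts.count("#")
--         return [c] if c else []
--     i = ts.index(".")
--     c = ts[:i].count("#")
--     return ([c] if c else []) + _runs(ts[i + 1:])
--
--
-- def calc_condition(springs: list[str]):
--     if "?" in springs:
--         prefix = springs[:springs.index("?")]
--     else:
--         prefix = list(springs)
--     return tuple(_runs(prefix))
-- ===== Notes on version B (the rewrite author's own statement) =====
-- stated objective: alternative
-- what changed: Replaced A's single stateful scan (boolean flag + running counter mutated per token, break on '?') by a different decomposition: cut the list at the first '?', then recursively split at the first '.', counting '#' tokens per segment with list.count and keeping non-zero counts.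
import Mathlib
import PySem

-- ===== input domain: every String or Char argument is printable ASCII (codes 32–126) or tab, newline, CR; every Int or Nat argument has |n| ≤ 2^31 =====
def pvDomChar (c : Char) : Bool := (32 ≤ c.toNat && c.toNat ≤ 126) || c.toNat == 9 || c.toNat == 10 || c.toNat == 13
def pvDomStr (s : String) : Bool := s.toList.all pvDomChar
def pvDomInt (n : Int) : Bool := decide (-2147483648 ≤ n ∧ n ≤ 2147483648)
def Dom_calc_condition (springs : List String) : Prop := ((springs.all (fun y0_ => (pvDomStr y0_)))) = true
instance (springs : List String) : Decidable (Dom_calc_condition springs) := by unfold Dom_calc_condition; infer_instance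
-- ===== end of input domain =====

-- B replaces A's stateful flag+counter scan by cutting at the first '?' and recursively
-- splitting at the first '.', counting '#' per segment (alternative decomposition, same cost).


-- ===== PORT A =====
-- A's loop: state (condition, func, curr_count); break at "?"; '.' flushes a running
-- count when func; '#' sets func and increments.
def calcLoopA (cond : List Int) (func : Bool) (cnt : Int) : List String → List Int
  | [] => if func then cond ++ [cnt] else cond
  | s :: rest =>
    if s = "?" then (if func then cond ++ [cnt] else cond)
    else
      let cond1 := if s = "." ∧ func then cond ++ [cnt] else cond
      let cnt1  := if s = "." ∧ func then 0 else cnt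
      let func1 := if s = "." ∧ func then false else func
      let func2 := if s = "#" then true else func1
      let cnt2  := if s = "#" then cnt1 + 1 else cnt1
      calcLoopA cond1 func2 cnt2 rest

def calc_condition (springs : List String) : List Int :=
  calcLoopA [] false 0 springs

-- ===== PORT B =====
-- _runs: split at the first '.', count '#' in the segment, keep if non-zero, recurse.
def calcRunsB (ts : List String) : List Int :=
  match h : PySem.List.index? ts "." with
  | none => let c : Int := ts.count "#"; if c ≠ 0 then [c] else []
  | some i =>
      (let c : Int := (ts.take i).count "#"; if c ≠ 0 then [c] else []) ++
        calcRunsB (ts.drop (i + 1))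
termination_by ts.length
decreasing_by
  obtain ⟨hk, -, -⟩ := PySem.List.getElem_of_index?_eq_some h
  simp only [List.length_drop]; omega

def calc_condition_alt (springs : List String) : List Int :=
  match PySem.List.index? springs "?" with
  | some i => calcRunsB (springs.take i)
  | none => calcRunsB springs

-- ===== PRECONDITION & SPEC =====
def Spec_calc_condition (springs : List String) (out : List Int) : Prop := out = calc_condition_alt springs
instance (springs : List String) (out : List Int) : Decidable (Spec_calc_condition springs out) := by unfold Spec_calc_condition; infer_instance

-- ===== CLAIM (what is proved, stated in full; the proofs are below) =====
def Claim_equal_calc_condition : Prop := ∀ (springs : List String), Dom_calc_condition springs → Spec_calc_condition springs (calc_condition springs)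

-- ===== LEMMAS AND PROOFS =====

-- carry-form of the run computation; bridge between the two ports
def goC : Int → List String → List Int
  | cnt, [] => if 0 < cnt then [cnt] else []
  | cnt, s :: rest =>
    if s = "." then (if 0 < cnt then cnt :: goC 0 rest else goC 0 rest)
    else if s = "#" then goC (cnt + 1) rest
    else goC cnt rest

theorem idx_some_take_drop {ts : List String} {v : String} {i : Nat}
    (h : PySem.List.index? ts v = some i) :
    ts.take i = ts.takeWhile (· ≠ v) ∧ ts.drop (i + 1) = (ts.dropWhile (· ≠ v)).tail := by
  induction ts generalizing i with
  | nil => simp [PySem.List.index?] at h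
  | cons x xs ih =>
    by_cases hx : x = v
    · subst hx
      rw [PySem.List.index?_cons_self] at h
      cases h
      simp
    · rw [PySem.List.index?_cons_of_ne xs hx] at h
      cases hj : PySem.List.index? xs v with
      | none => rw [hj] at h; simp at h
      | some j =>
        rw [hj] at h
        simp at h
        subst h
        obtain ⟨h1, h2⟩ := ih hj
        simp [hx, h1, h2]

theorem idx_none_takeWhile {ts : List String} {v : String}
    (h : PySem.List.index? ts v = none) :
    ts.takeWhile (· ≠ v) = ts := by
  rw [PySem.List.index?_eq_none_iff] at h
  apply List.takeWhile_eq_self_iff.mpr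
  intro x hx
  simp
  intro hxv; exact h (hxv ▸ hx)

-- one-step characterisation of calcRunsB via takeWhile/dropWhile
theorem calcRunsB_eq (ts : List String) :
    calcRunsB ts =
      (if ((ts.takeWhile (· ≠ ".")).count "#" : Int) ≠ 0
        then [((ts.takeWhile (· ≠ ".")).count "#" : Int)] else []) ++
      calcRunsB ((ts.dropWhile (· ≠ ".")).tail) := by
  rw [calcRunsB]
  split
  next h =>
    have ht := idx_none_takeWhile h
    have hd : ts.dropWhile (· ≠ ".") = [] := by
      have := List.takeWhile_append_dropWhile (p := (· ≠ ".")) (l := ts)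
      rw [ht] at this
      simpa using this
    rw [ht, hd]
    simp [calcRunsB]
  next i h =>
    obtain ⟨h1, h2⟩ := idx_some_take_drop h
    rw [h1, h2]

theorem goC_eq_calcRunsB (ts : List String) :
    ∀ cnt : Int, 0 ≤ cnt →
      goC cnt ts =
        (if cnt + ((ts.takeWhile (· ≠ ".")).count "#" : Int) ≠ 0
          then [cnt + ((ts.takeWhile (· ≠ ".")).count "#" : Int)] else []) ++
        calcRunsB ((ts.dropWhile (· ≠ ".")).tail) := by
  induction ts with
  | nil =>
    intro cnt hc
    have h0 : calcRunsB [] = [] := by simp [calcRunsB]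
    simp only [goC, List.takeWhile_nil, List.dropWhile_nil, List.tail_nil, List.count_nil,
      Nat.cast_zero, add_zero, h0, List.append_nil]
    split_ifs <;> first | rfl | omega
  | cons s rest ih =>
    intro cnt hc
    by_cases hd : s = "."
    · subst hd
      have hrest : goC 0 rest = calcRunsB rest := by
        rw [ih 0 le_rfl]
        simp only [zero_add]
        rw [← calcRunsB_eq]
      rw [show goC cnt ("." :: rest) = if 0 < cnt then cnt :: goC 0 rest else goC 0 rest
            from by simp [goC]]
      have htw : ("." :: rest).takeWhile (· ≠ ".") = [] := by simp
      have hdw : ("." :: rest).dropWhile (· ≠ ".") = "." :: rest := by simp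
      rw [htw, hdw, List.tail_cons, List.count_nil, hrest]
      by_cases hp : 0 < cnt
      · simp [hp, show cnt ≠ 0 by omega]
      · have hz : cnt = 0 := by omega
        subst hz
        simp
    · by_cases hh : s = "#"
      · subst hh
        rw [show goC cnt ("#" :: rest) = goC (cnt + 1) rest from by simp [goC]]
        rw [ih (cnt + 1) (by omega)]
        have htw : ("#" :: rest).takeWhile (· ≠ ".") = "#" :: rest.takeWhile (· ≠ ".") := by
          simp
        have hdw : ("#" :: rest).dropWhile (· ≠ ".") = rest.dropWhile (· ≠ ".") := by simp
        rw [htw, hdw, List.count_cons_self]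
        rw [show cnt + 1 + ((rest.takeWhile (· ≠ ".")).count "#" : Int)
              = cnt + ((((rest.takeWhile (· ≠ ".")).count "#") + 1 : Nat) : Int)
            from by push_cast; ring]
      · rw [show goC cnt (s :: rest) = goC cnt rest from by simp [goC, hd, hh]]
        rw [ih cnt hc]
        have htw : (s :: rest).takeWhile (· ≠ ".") = s :: rest.takeWhile (· ≠ ".") := by
          simp [hd]
        have hdw : (s :: rest).dropWhile (· ≠ ".") = rest.dropWhile (· ≠ ".") := by simp [hd]
        rw [htw, hdw, List.count_cons_of_ne (by simpa using hh)]

theorem calcLoopA_break (cond : List Int) (func : Bool) (cnt : Int) (ts : List String) :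
    calcLoopA cond func cnt ts = calcLoopA cond func cnt (ts.takeWhile (· ≠ "?")) := by
  induction ts generalizing cond func cnt with
  | nil => rfl
  | cons s rest ih =>
    by_cases hq : s = "?"
    · subst hq
      simp [calcLoopA]
    · simp only [calcLoopA, if_neg hq, List.takeWhile_cons]
      simp only [ne_eq, hq, not_false_eq_true, decide_true, if_true]
      simp only [calcLoopA, if_neg hq]
      exact ih _ _ _

theorem loopA_cons_dot (cond : List Int) (func : Bool) (cnt : Int) (rest : List String) :
    calcLoopA cond func cnt ("." :: rest) =
      if func then calcLoopA (cond ++ [cnt]) false 0 rest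
      else calcLoopA cond func cnt rest := by
  cases func <;> simp [calcLoopA]

theorem loopA_cons_hash (cond : List Int) (func : Bool) (cnt : Int) (rest : List String) :
    calcLoopA cond func cnt ("#" :: rest) = calcLoopA cond true (cnt + 1) rest := by
  cases func <;> simp [calcLoopA]

theorem loopA_cons_other {s : String} (hs : s ≠ "?") (hd : s ≠ ".") (hh : s ≠ "#")
    (cond : List Int) (func : Bool) (cnt : Int) (rest : List String) :
    calcLoopA cond func cnt (s :: rest) = calcLoopA cond func cnt rest := by
  cases func <;> simp [calcLoopA, hs, hd, hh]

theorem calcLoopA_eq_goC (ts : List String) (hq : "?" ∉ ts) :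
    ∀ (cond : List Int) (cnt : Int), 0 ≤ cnt →
      calcLoopA cond (decide (0 < cnt)) cnt ts = cond ++ goC cnt ts := by
  induction ts with
  | nil =>
    intro cond cnt hc
    by_cases hp : 0 < cnt <;> simp [calcLoopA, goC, hp]
  | cons s rest ih =>
    intro cond cnt hc
    have hs : s ≠ "?" := fun h => hq (h ▸ List.mem_cons_self ..)
    have hrest : "?" ∉ rest := fun h => hq (List.mem_cons_of_mem _ h)
    by_cases hd : s = "."
    · subst hd
      rw [loopA_cons_dot]
      rw [show goC cnt ("." :: rest) = if 0 < cnt then cnt :: goC 0 rest else goC 0 rest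
            from by simp [goC]]
      have h0 := ih hrest (cond ++ [cnt]) 0 le_rfl
      have h0' := ih hrest cond 0 le_rfl
      rw [show decide ((0 : Int) < 0) = false from by decide] at h0 h0'
      by_cases hp : 0 < cnt
      · rw [decide_eq_true hp, if_pos rfl, if_pos hp, h0]
        simp
      · have hz : cnt = 0 := by omega
        subst hz
        rw [show decide ((0 : Int) < 0) = false from by decide]
        simp only [Bool.false_eq_true, if_false, if_neg hp]
        exact h0'
    · by_cases hh : s = "#"
      · subst hh
        rw [loopA_cons_hash]
        have h1 := ih hrest cond (cnt + 1) (by omega)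
        rw [decide_eq_true (show (0 : Int) < cnt + 1 by omega)] at h1
        rw [h1, show goC cnt ("#" :: rest) = goC (cnt + 1) rest from by simp [goC]]
      · rw [loopA_cons_other hs hd hh]
        rw [ih hrest cond cnt hc,
          show goC cnt (s :: rest) = goC cnt rest from by simp [goC, hd, hh]]

theorem goC_zero_eq (ts : List String) : goC 0 ts = calcRunsB ts := by
  rw [goC_eq_calcRunsB ts 0 le_rfl]
  simp only [zero_add]
  rw [← calcRunsB_eq]

-- ===== VERDICT (by name: the statement is the Claim_ definition above) =====
theorem calc_condition_spec : Claim_equal_calc_condition := by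
  intro springs _
  unfold Spec_calc_condition calc_condition calc_condition_alt
  rw [calcLoopA_break]
  have hq : "?" ∉ springs.takeWhile (· ≠ "?") := by
    intro h
    have := List.mem_takeWhile_imp h
    simp at this
  have := calcLoopA_eq_goC (springs.takeWhile (· ≠ "?")) hq [] 0 le_rfl
  simp only [decide_eq_false (by omega : ¬ (0:Int) < 0)] at this
  rw [this, List.nil_append, goC_zero_eq]
  cases h : PySem.List.index? springs "?" with
  | none =>
    show calcRunsB _ = calcRunsB springs
    rw [idx_none_takeWhile h]
  | some i =>
    show calcRunsB _ = calcRunsB (springs.take i)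
    rw [(idx_some_take_drop h).1]
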